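-- pv_equiv track=rewrite | github.com/Hatoris/BioPlate | tests/test_plate_to_excel.py | remove_tail
-- ===== SOURCE A (Python) =====
-- def remove_tail(liste):
--     lis = liste[::-1]
--     for i, val in enumerate(lis):
--         if not val:
--             del lis[i]
--             liste = lis[::-1]
--             return remove_tail(liste)
--         else:
--             return liste
-- ===== SOURCE B (Python) =====
-- def remove_tail(liste):
--     while liste and not liste[-1]:
--         liste = liste[:-1]
--     return liste if liste else None
-- ===== Notes on version B (the rewrite author's own statement) =====
-- stated objective: simpler
-- what changed: Replaces A's recursion (reverse, enumerate, delete, reverse back, recurse once per stripped element) by a single iterative while loop that drops the last falsy element via slicing.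
import Mathlib
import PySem

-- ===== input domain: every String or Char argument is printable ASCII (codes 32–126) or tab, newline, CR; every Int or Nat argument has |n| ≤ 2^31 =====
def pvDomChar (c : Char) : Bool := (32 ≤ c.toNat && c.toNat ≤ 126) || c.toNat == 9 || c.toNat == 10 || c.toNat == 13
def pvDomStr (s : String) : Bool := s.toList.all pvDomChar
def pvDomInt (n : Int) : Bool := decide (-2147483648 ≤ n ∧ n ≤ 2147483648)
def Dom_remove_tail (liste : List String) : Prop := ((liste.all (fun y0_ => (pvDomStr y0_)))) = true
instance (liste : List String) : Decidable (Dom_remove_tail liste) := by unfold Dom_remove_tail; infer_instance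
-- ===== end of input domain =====

-- B replaces A's recursion by one iterative while loop over non-mutating slices; same values everywhere.

-- ===== PORT A =====
-- liste[::-1] is List.reverse (exact); the for loop always returns in its first
-- iteration (both branches return), so only i = 0 / val = lis[0] is reached,
-- and 'del lis[0]; lis[::-1]' is rest.reverse.
def remove_tail (liste : List String) : Option (List String) :=
  match h : liste.reverse with
  | [] => none                                   -- loop body never runs: implicit None
  | val :: rest =>
    if val = "" then remove_tail rest.reverse    -- 'not val' for a string: val == ""
    else some liste
termination_by liste.length
decreasing_by
  have : liste.length = rest.length + 1 := by
    have := congrArg List.length h; simpa using this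
  simp [this]

-- ===== PORT B =====
-- while liste and not liste[-1]: liste = liste[:-1]
def stripTail (l : List String) : List String :=
  match hg : l.getLast? with
  | some v => if v = "" then stripTail (PySem.List.slice l none (some (-1))) else l
  | none => l
termination_by l.length
decreasing_by
  have hne : l ≠ [] := by intro he; simp [he] at hg
  cases l with
  | nil => exact absurd rfl hne
  | cons a as => simp [PySem.List.slice]

def remove_tail_alt (liste : List String) : Option (List String) :=
  let r := stripTail liste
  if r = [] then none else some r

-- ===== PRECONDITION & SPEC =====
def Spec_remove_tail (liste : List String) (out : Option (List String)) : Prop := out = remove_tail_alt liste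
instance (liste : List String) (out : Option (List String)) : Decidable (Spec_remove_tail liste out) := by unfold Spec_remove_tail; infer_instance

-- ===== CLAIM (what is proved, stated in full; the proofs are below) =====
def Claim_equal_remove_tail : Prop := ∀ (liste : List String), Dom_remove_tail liste → Spec_remove_tail liste (remove_tail liste)

-- ===== LEMMAS AND PROOFS =====

-- ===== VERDICT (by name: the statement is the Claim_ definition above) =====
lemma slice_neg_one (l : List String) : PySem.List.slice l none (some (-1)) = l.dropLast := by
  have h := PySem.List.slice_to_neg_natCast (xs := l) (k := 1) (by omega)
  simpa [List.dropLast_eq_take] using h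

lemma main_eq_fuel : ∀ (n : Nat) (l : List String), l.length ≤ n → remove_tail l = remove_tail_alt l := by
  intro n
  induction n with
  | zero =>
    intro l hl
    have : l = [] := by cases l <;> simp_all
    subst this
    rw [remove_tail]; simp [remove_tail_alt, stripTail]
  | succ n ih =>
  intro l hlen
  rw [remove_tail]
  cases h : l.reverse with
  | nil =>
    have : l = [] := by simpa using congrArg List.reverse h
    subst this
    simp [remove_tail_alt, stripTail]
  | cons val rest =>
    have hl : l = rest.reverse ++ [val] := by
      have := congrArg List.reverse h; simpa using this
    by_cases hv : val = ""
    · simp only [hv, if_true]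
      rw [ih rest.reverse (by have := congrArg List.length hl; simp at this ⊢; omega)]
      have hlast : l.getLast? = some val := by simp [hl]
      have hstrip : stripTail l = stripTail rest.reverse := by
        rw [stripTail, hlast]
        simp only [hv, slice_neg_one, if_true]
        rw [show l.dropLast = rest.reverse by simp [hl]]
      simp [remove_tail_alt, hstrip]
    · simp only [if_neg hv]
      have hlast : l.getLast? = some val := by simp [hl]
      have hstrip : stripTail l = l := by rw [stripTail, hlast]; simp [hv]
      have hne : l ≠ [] := by simp [hl]
      simp [remove_tail_alt, hstrip, hne]

theorem remove_tail_spec : Claim_equal_remove_tail := by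
  intro l _
  unfold Spec_remove_tail
  exact main_eq_fuel l.length l le_rfl
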